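-- pv_equiv track=rewrite | github.com/DamourYouKnow/HAHA-NO-UR | core/image_generator.py | compute_pos
-- ===== SOURCE A (Python) =====
-- from typing import List, Sequence, Tuple
--
-- def compute_pos(
--         sizes: List[Tuple[int]], num_rows: int,
--         x_padding: int, y_padding: int, align: bool) -> tuple:
--     """
--     Compute all images positions from the list of images and number of rows.
--
--     :param sizes: A list of sizes for all images.
--     :param num_rows: the number of rows.
--     :param x_padding: x spacing between each image
--     :param y_padding: y spacing between each row
--     :param align: to align middle the image or not.
--     :return: Positions for all images, the total x size, the total y size
--     """
--     total_x, total_y = 0, 0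
--     rows = split(sizes, num_rows)
--     res = []
--     row_x_sizes = []
--
--     for row in rows:
--         row_x_sizes.append(
--             sum([i[0] for i in row]) + x_padding * (len(row) - 1))
--         row_y = max([i[1] for i in row])
--         res.append(compute_row(row, x_padding, total_y))
--         total_y += row_y + y_padding
--         total_x = max(row_x_sizes)
--     i = 0
--     for row, row_x, row_sizes in zip(res, row_x_sizes, rows):
--         actual = row_sizes[-1][0] + row[-1][0]
--         diff = round((total_x - actual) / 2)
--         if not align and diff > 0:
--             res[i] = [(x + diff, y) for x, y in row]
--         i += 1
--     return res, total_x, total_y - y_padding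
--
-- def compute_row(
--         row_sizes: List[Tuple[int]],
--         x_padding: int, y_pos: int) -> List[Tuple[int]]:
--     """
--     Compute the positions for a single row.
--
--     :param row_sizes: the list of image sizes in that row.
--     :param x_padding: the x padding in between images.
--     :param y_pos: the y position of that row.
--
--     :return: A list of (x, y) positions for that row.
--     """
--     res = []
--     x = 0
--     for size in row_sizes:
--         res.append((x, y_pos))
--         x += size[0] + x_padding
--     return res
--
-- def split(in_: Sequence, chunks: int) -> List[List]:
--     """
--     Split a sequence into roughly equal chunks.
--
--     :param in_: the input sequence.
--     :param chunks: the number of chunks.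
--
--     :return: the sequence split up into chunks.
--     """
--     k, m = divmod(len(in_), chunks)
--     return [
--         in_[i * k + min(i, m):(i + 1) * k + min(i + 1, m)]
--         for i in range(chunks)
--     ]
-- ===== SOURCE B (Python) =====
-- def compute_pos(sizes, num_rows, x_padding, y_padding, align):
--     """Metrics-first re-implementation: compute each row's width first, then lay
--     out every row in a single constructive pass with the centering offset baked
--     into the starting x (no post-hoc adjustment pass)."""
--     rows = split(sizes, num_rows)
--     widths = [sum(w for w, _ in row) + x_padding * (len(row) - 1) for row in rows]
--     total_x = max(widths, default=0)
--     positions = []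
--     y = 0
--     for row, row_x in zip(rows, widths):
--         off = round((total_x - row_x) / 2)
--         x = off if (not align and off > 0) else 0
--         pos = []
--         for w, h in row:
--             pos.append((x, y))
--             x += w + x_padding
--         positions.append(pos)
--         y += max(h for _, h in row) + y_padding
--     return positions, total_x, y - y_padding
--
-- def split(in_, chunks):
--     k, m = divmod(len(in_), chunks)
--     return [
--         in_[i * k + min(i, m):(i + 1) * k + min(i + 1, m)]
--         for i in range(chunks)
--     ]
-- ===== Notes on version B (the rewrite author's own statement) =====
-- stated objective: simpler
-- what changed: A builds every row at x=0, records row widths, and then runs a second adjustment pass that recovers each row's width from its last element ([-1] indexing) and shifts the whole row by the centering diff; B computes all row widths first and builds each row exactly once with the centering offset baked into the starting x, so the post-hoc adjustment pass and the compute_row helper disappear.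
import Mathlib
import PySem

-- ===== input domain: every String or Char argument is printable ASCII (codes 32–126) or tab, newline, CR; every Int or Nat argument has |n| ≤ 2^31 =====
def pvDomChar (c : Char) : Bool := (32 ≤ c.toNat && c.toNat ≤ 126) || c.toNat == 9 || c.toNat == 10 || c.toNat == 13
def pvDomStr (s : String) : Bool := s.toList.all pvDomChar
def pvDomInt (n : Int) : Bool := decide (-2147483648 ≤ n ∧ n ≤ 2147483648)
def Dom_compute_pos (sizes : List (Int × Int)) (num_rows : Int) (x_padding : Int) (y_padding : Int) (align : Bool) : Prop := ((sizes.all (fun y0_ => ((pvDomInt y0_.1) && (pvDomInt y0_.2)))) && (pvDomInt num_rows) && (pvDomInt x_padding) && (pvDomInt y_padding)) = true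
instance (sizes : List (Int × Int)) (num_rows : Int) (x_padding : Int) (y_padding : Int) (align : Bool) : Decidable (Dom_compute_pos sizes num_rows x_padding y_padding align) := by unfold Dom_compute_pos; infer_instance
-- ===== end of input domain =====

-- B replaces A's build-then-patch layout (construct rows at x=0, then shift whole rows by the
-- centering diff in a second adjustment pass) by a metrics-first layout: compute every row width
-- first, then build each row once with the centering offset baked into the starting x (objective:
-- simpler, no post-hoc adjustment pass).

-- ===== PORT A =====
-- round(n / 2) for an integer n: Python rounds the float n/2 half-to-even.  Hand-ported
-- (floats are outside the type convention); exact for |n| < 2^53, far beyond the stated domain.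
def pyHalfRound (n : Int) : Int :=
  let q := PySem.Int.floordiv n 2
  if PySem.Int.mod n 2 = 0 then q
  else if PySem.Int.mod q 2 = 0 then q else q + 1

-- helper split(in_, chunks) (identical in Source A and Source B)
def pySplit (l : List (Int × Int)) (chunks : Int) : List (List (Int × Int)) :=
  let k := PySem.Int.floordiv (l.length : Int) chunks
  let m := PySem.Int.mod (l.length : Int) chunks
  (PySem.List.pyRange 0 chunks 1).map fun i =>
    PySem.List.slice l (some (i * k + min i m)) (some ((i + 1) * k + min (i + 1) m))

-- helper compute_row(row_sizes, x_padding, y_pos) of Source A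
def compute_row (row_sizes : List (Int × Int)) (x_padding : Int) (y_pos : Int) : List (Int × Int) :=
  (row_sizes.foldl (fun (st : List (Int × Int) × Int) size =>
      (st.1 ++ [(st.2, y_pos)], st.2 + size.1 + x_padding)) ([], 0)).1

def compute_pos (sizes : List (Int × Int)) (num_rows : Int) (x_padding : Int) (y_padding : Int) (align : Bool) : (List (List (Int × Int))) × Int × Int :=
  let rows := pySplit sizes num_rows
  -- first loop: res, row_x_sizes, total_y, total_x  (max([]) would raise: excluded by Pre_)
  let st := rows.foldl (fun (st : List (List (Int × Int)) × List Int × Int × Int) row =>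
      let rxs := st.2.1 ++ [(row.map Prod.fst).sum + x_padding * ((row.length : Int) - 1)]
      let row_y := (PySem.List.max? (row.map Prod.snd) (fun y => y)).getD 0
      ((st.1 ++ [compute_row row x_padding st.2.2.1], rxs,
        st.2.2.1 + row_y + y_padding, (PySem.List.max? rxs (fun x => x)).getD 0)))
    ([], [], 0, 0)
  -- second loop: shift each row by the centering diff (row[-1] on an empty row: excluded by Pre_)
  let res2 := (st.1.zip (st.2.1.zip rows)).map (fun p =>
      let actual := (PySem.List.pyGetD p.2.2 (-1) ((0 : Int), (0 : Int))).1 +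
                    (PySem.List.pyGetD p.1 (-1) ((0 : Int), (0 : Int))).1
      let diff := pyHalfRound (st.2.2.2 - actual)
      if !align && diff > 0 then p.1.map (fun q => (q.1 + diff, q.2)) else p.1)
  (res2, st.2.2.2, st.2.2.1 - y_padding)

-- ===== PORT B =====
def compute_pos_alt (sizes : List (Int × Int)) (num_rows : Int) (x_padding : Int) (y_padding : Int) (align : Bool) : (List (List (Int × Int))) × Int × Int :=
  let rows := pySplit sizes num_rows
  let widths := rows.map (fun row => (row.map Prod.fst).sum + x_padding * ((row.length : Int) - 1))
  let total_x := PySem.List.maxD widths (fun x => x) 0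
  let st := (rows.zip widths).foldl (fun (st : List (List (Int × Int)) × Int) p =>
      let off := pyHalfRound (total_x - p.2)
      let x0 := if !align && off > 0 then off else 0
      let pos := (p.1.foldl (fun (q : List (Int × Int) × Int) wh =>
          (q.1 ++ [(q.2, st.2)], q.2 + wh.1 + x_padding)) ([], x0)).1
      (st.1 ++ [pos], st.2 + (PySem.List.max? (p.1.map Prod.snd) (fun y => y)).getD 0 + y_padding))
    ([], 0)
  (st.1, total_x, st.2 - y_padding)

-- ===== PRECONDITION & SPEC =====
-- Pre_ excludes exactly the inputs where the Python A raises: num_rows = 0 (ZeroDivisionError in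
-- divmod) and 1 ≤ num_rows with fewer sizes than rows (split produces an empty row, max([]) raises
-- ValueError).  For num_rows < 0 the condition holds vacuously (A returns ([], 0, -y_padding)).
def Pre_compute_pos (sizes : List (Int × Int)) (num_rows : Int) (x_padding : Int) (y_padding : Int) (align : Bool) : Prop :=
  num_rows ≠ 0 ∧ num_rows ≤ (sizes.length : Int)
instance (sizes : List (Int × Int)) (num_rows : Int) (x_padding : Int) (y_padding : Int) (align : Bool) : Decidable (Pre_compute_pos sizes num_rows x_padding y_padding align) := by unfold Pre_compute_pos; infer_instance

def pvWitness_compute_pos : (List (Int × Int)) × Int × Int × Int × Bool :=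
  ([(3, 2), (4, 1), (5, 6)], 2, 1, 1, false)

def Spec_compute_pos (sizes : List (Int × Int)) (num_rows : Int) (x_padding : Int) (y_padding : Int) (align : Bool) (out : (List (List (Int × Int))) × Int × Int) : Prop := out = compute_pos_alt sizes num_rows x_padding y_padding align
instance (sizes : List (Int × Int)) (num_rows : Int) (x_padding : Int) (y_padding : Int) (align : Bool) (out : (List (List (Int × Int))) × Int × Int) : Decidable (Spec_compute_pos sizes num_rows x_padding y_padding align out) := by unfold Spec_compute_pos; infer_instance

-- ===== CLAIM (what is proved, stated in full; the proofs are below) =====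
def Claim_equal_compute_pos : Prop := ∀ (sizes : List (Int × Int)) (num_rows : Int) (x_padding : Int) (y_padding : Int) (align : Bool), Dom_compute_pos sizes num_rows x_padding y_padding align → Pre_compute_pos sizes num_rows x_padding y_padding align → Spec_compute_pos sizes num_rows x_padding y_padding align (compute_pos sizes num_rows x_padding y_padding align)

-- ===== LEMMAS AND PROOFS =====

-- abstractions of the per-row quantities (proof-side only)
def rowW (xp : Int) (row : List (Int × Int)) : Int :=
  (row.map Prod.fst).sum + xp * ((row.length : Int) - 1)
def rowH (row : List (Int × Int)) : Int :=
  (PySem.List.max? (row.map Prod.snd) (fun y => y)).getD 0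

-- the positions of one row laid out left to right from x
def crow (xp y : Int) : List (Int × Int) → Int → List (Int × Int)
  | [], _ => []
  | wh :: t, x => (x, y) :: crow xp y t (x + wh.1 + xp)

-- what A's first loop appends to res, row by row
def aresA (xp yp : Int) : List (List (Int × Int)) → Int → List (List (Int × Int))
  | [], _ => []
  | r :: t, ty => compute_row r xp ty :: aresA xp yp t (ty + rowH r + yp)

-- what B's loop appends, row by row (tx = total_x, al = align)
def bres (xp yp tx : Int) (al : Bool) : List (List (Int × Int)) → Int → List (List (Int × Int))
  | [], _ => []
  | r :: t, y =>
    (crow xp y r (if !al && pyHalfRound (tx - rowW xp r) > 0 then pyHalfRound (tx - rowW xp r) else 0))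
      :: bres xp yp tx al t (y + rowH r + yp)

def sumH (yp : Int) (rs : List (List (Int × Int))) : Int := (rs.map (fun r => rowH r + yp)).sum

theorem crow_spec (xp y : Int) (row : List (Int × Int)) : ∀ (q0 : List (Int × Int)) (x : Int),
    row.foldl (fun (q : List (Int × Int) × Int) wh =>
        (q.1 ++ [(q.2, y)], q.2 + wh.1 + xp)) (q0, x)
      = (q0 ++ crow xp y row x, x + ((row.map Prod.fst).sum + xp * (row.length : Int))) := by
  induction row with
  | nil => intro q0 x; simp [crow]
  | cons wh t ih =>
    intro q0 x
    simp only [List.foldl_cons, ih, crow, List.map_cons, List.sum_cons, List.length_cons,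
      Prod.mk.injEq]
    refine ⟨by simp, by push_cast; ring⟩

theorem compute_row_eq (xp y : Int) (row : List (Int × Int)) :
    compute_row row xp y = crow xp y row 0 := by
  unfold compute_row
  rw [crow_spec]
  simp

theorem crow_shift (xp y d : Int) (row : List (Int × Int)) : ∀ x,
    (crow xp y row x).map (fun q => (q.1 + d, q.2)) = crow xp y row (x + d) := by
  induction row with
  | nil => intro x; simp [crow]
  | cons wh t ih =>
    intro x
    simp only [crow, List.map_cons, ih]
    congr 2
    ring

theorem crow_last (xp y : Int) (row : List (Int × Int)) : ∀ x, row ≠ [] →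
    ((row.getLast?.getD ((0 : Int), (0 : Int))).1 +
      ((crow xp y row x).getLast?.getD ((0 : Int), (0 : Int))).1 = x + rowW xp row) := by
  induction row with
  | nil => intro x h; exact absurd rfl h
  | cons wh t ih =>
    intro x _h
    cases t with
    | nil => simp [crow, rowW]; ring
    | cons wh2 t2 =>
      have ht : (wh2 :: t2 : List (Int × Int)) ≠ [] := by simp
      have e1 : crow xp y (wh :: wh2 :: t2) x
          = (x, y) :: (x + wh.1 + xp, y) :: crow xp y t2 (x + wh.1 + xp + wh2.1 + xp) := rfl
      rw [e1, List.getLast?_cons_cons, List.getLast?_cons_cons]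
      have h := ih (x + wh.1 + xp) ht
      have e2 : crow xp y (wh2 :: t2) (x + wh.1 + xp)
          = (x + wh.1 + xp, y) :: crow xp y t2 (x + wh.1 + xp + wh2.1 + xp) := rfl
      rw [e2] at h
      have hW : (x + wh.1 + xp) + rowW xp (wh2 :: t2) = x + rowW xp (wh :: wh2 :: t2) := by
        simp only [rowW, List.map_cons, List.sum_cons, List.length_cons]
        push_cast; ring
      linarith [h, hW]

theorem crow_ne_nil (xp y x : Int) (row : List (Int × Int)) (h : row ≠ []) :
    crow xp y row x ≠ [] := by
  cases row with
  | nil => exact absurd rfl h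
  | cons wh t => simp [crow]

-- actual = row's width: row_sizes[-1][0] + compute_row(...)[-1][0] = rowW
theorem actual_eq (xp ty : Int) (r : List (Int × Int)) (h : r ≠ []) :
    (PySem.List.pyGetD r (-1) ((0 : Int), (0 : Int))).1 +
      (PySem.List.pyGetD (compute_row r xp ty) (-1) ((0 : Int), (0 : Int))).1 = rowW xp r := by
  rw [compute_row_eq]
  have h2 : crow xp ty r 0 ≠ [] := crow_ne_nil xp ty 0 r h
  rw [PySem.List.pyGetD_neg_one r _ h, PySem.List.pyGetD_neg_one _ _ h2]
  have e1 : r.getLast?.getD ((0 : Int), (0 : Int)) = r.getLast h := by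
    rw [List.getLast?_eq_some_getLast h]; rfl
  have e2 : (crow xp ty r 0).getLast?.getD ((0 : Int), (0 : Int)) = (crow xp ty r 0).getLast h2 := by
    rw [List.getLast?_eq_some_getLast h2]; rfl
  rw [← e1, ← e2]
  have := crow_last xp ty r 0 h
  linarith [this]

-- A's first loop, characterised
theorem foldA_spec (xp yp : Int) (rs : List (List (Int × Int))) :
    ∀ (res0 : List (List (Int × Int))) (rxs0 : List Int) (ty0 tx0 : Int),
    rs.foldl (fun (st : List (List (Int × Int)) × List Int × Int × Int) row =>
      let rxs := st.2.1 ++ [(row.map Prod.fst).sum + xp * ((row.length : Int) - 1)]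
      let row_y := (PySem.List.max? (row.map Prod.snd) (fun y => y)).getD 0
      ((st.1 ++ [compute_row row xp st.2.2.1], rxs,
        st.2.2.1 + row_y + yp, (PySem.List.max? rxs (fun x => x)).getD 0)))
      (res0, rxs0, ty0, tx0)
    = (res0 ++ aresA xp yp rs ty0, rxs0 ++ rs.map (rowW xp), ty0 + sumH yp rs,
       if rs.isEmpty then tx0
       else (PySem.List.max? (rxs0 ++ rs.map (rowW xp)) (fun x => x)).getD 0) := by
  induction rs with
  | nil => intro res0 rxs0 ty0 tx0; simp [aresA, sumH]
  | cons r t ih =>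
    intro res0 rxs0 ty0 tx0
    rw [List.foldl_cons, ih]
    simp only [aresA, sumH, List.map_cons, List.sum_cons, rowW, rowH, List.isEmpty_cons,
      Prod.mk.injEq]
    refine ⟨by simp, by simp, by ring, ?_⟩
    cases t with
    | nil => simp
    | cons r2 t2 => simp

-- B's loop, characterised
theorem foldB_spec (xp yp tx : Int) (al : Bool) (rs : List (List (Int × Int))) :
    ∀ (acc0 : List (List (Int × Int))) (y0 : Int),
    (rs.map (fun r => (r, rowW xp r))).foldl
      (fun (st : List (List (Int × Int)) × Int) p =>
        let off := pyHalfRound (tx - p.2)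
        let x0 := if !al && off > 0 then off else 0
        let pos := (p.1.foldl (fun (q : List (Int × Int) × Int) wh =>
            (q.1 ++ [(q.2, st.2)], q.2 + wh.1 + xp)) ([], x0)).1
        (st.1 ++ [pos], st.2 + (PySem.List.max? (p.1.map Prod.snd) (fun y => y)).getD 0 + yp))
      (acc0, y0)
    = (acc0 ++ bres xp yp tx al rs y0, y0 + sumH yp rs) := by
  induction rs with
  | nil => intro acc0 y0; simp [bres, sumH]
  | cons r t ih =>
    intro acc0 y0
    simp only [List.map_cons, List.foldl_cons]
    rw [crow_spec, ih]
    simp only [bres, sumH, List.map_cons, List.sum_cons, rowH, Prod.mk.injEq]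
    refine ⟨by simp, by ring⟩

-- A's adjustment pass over its first-loop output equals B's direct construction
theorem assemble (xp yp tx : Int) (al : Bool) (rs : List (List (Int × Int)))
    (hne : ∀ r ∈ rs, r ≠ []) : ∀ ty,
    ((aresA xp yp rs ty).zip ((rs.map (rowW xp)).zip rs)).map (fun p =>
        let actual := (PySem.List.pyGetD p.2.2 (-1) ((0 : Int), (0 : Int))).1 +
                      (PySem.List.pyGetD p.1 (-1) ((0 : Int), (0 : Int))).1
        let diff := pyHalfRound (tx - actual)
        if !al && diff > 0 then p.1.map (fun q => (q.1 + diff, q.2)) else p.1)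
    = bres xp yp tx al rs ty := by
  induction rs with
  | nil => intro ty; simp [aresA, bres]
  | cons r t ih =>
    intro ty
    have hr : r ≠ [] := hne r (by simp)
    have hact := actual_eq xp ty r hr
    rw [compute_row_eq] at hact
    simp only [aresA, List.map_cons, List.zip_cons_cons, bres]
    rw [ih (fun x hx => hne x (by simp [hx])) (ty + rowH r + yp)]
    congr 1
    simp only [compute_row_eq, hact]
    split_ifs with h1
    · rw [crow_shift]; simp
    · rfl

theorem slice_ne_nil {α : Type} (l : List α) (a b : Int) (ha : 0 ≤ a) (hab : a < b)
    (hal : a < (l.length : Int)) : PySem.List.slice l (some a) (some b) ≠ [] := by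
  have hb : 0 ≤ b := by omega
  rw [PySem.List.slice_toNat l ha hb]
  have hlen : (List.take (b.toNat - a.toNat) (List.drop a.toNat l)).length
      = min (b.toNat - a.toNat) (l.length - a.toNat) := by
    simp [List.length_take, List.length_drop]
  intro hnil
  rw [hnil] at hlen
  simp at hlen
  omega

theorem split_rows_ne_nil (sizes : List (Int × Int)) (num_rows : Int)
    (hle : num_rows ≤ (sizes.length : Int)) :
    ∀ r ∈ pySplit sizes num_rows, r ≠ [] := by
  intro r hr
  unfold pySplit at hr
  simp only [List.mem_map] at hr
  obtain ⟨i, hi, rfl⟩ := hr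
  rw [PySem.List.mem_pyRange_one] at hi
  obtain ⟨hi0, hilt⟩ := hi
  have hpos : 0 < num_rows := by omega
  set k := PySem.Int.floordiv (sizes.length : Int) num_rows with hk
  set m := PySem.Int.mod (sizes.length : Int) num_rows with hm
  have hsum : k * num_rows + m = (sizes.length : Int) :=
    PySem.Int.floordiv_mul_add_mod _ _
  have hm0 : 0 ≤ m := PySem.Int.mod_nonneg _ hpos
  have hmlt : m < num_rows := PySem.Int.mod_lt _ hpos
  have hk1 : 1 ≤ k := by
    rw [hk, PySem.Int.le_floordiv_iff_mul_le hpos]; omega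
  have hik : i * k ≤ (num_rows - 1) * k :=
    mul_le_mul_of_nonneg_right (by omega) (by omega)
  have hring : (num_rows - 1) * k + k = k * num_rows := by ring
  have hik2 : (i + 1) * k = i * k + k := by ring
  have hmin0 : 0 ≤ min i m := le_min hi0 hm0
  have hminle : min i m ≤ m := min_le_right i m
  have hminmono : min i m ≤ min (i + 1) m := by omega
  have hmin1le : min (i + 1) m ≤ m := min_le_right (i + 1) m
  have hik0 : 0 ≤ i * k := mul_nonneg hi0 (by omega)
  apply slice_ne_nil
  · omega
  · -- a < b
    rw [hik2]; omega
  · -- a < len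
    omega

-- maxD with identity key is max?.getD
theorem maxD_eq (l : List Int) (d : Int) :
    PySem.List.maxD l (fun x => x) d = (PySem.List.max? l (fun x => x)).getD d := by
  cases l <;> rfl

-- ===== VERDICT (by name: the statement is the Claim_ definition above) =====
theorem compute_pos_spec : Claim_equal_compute_pos := by
  intro sizes num_rows xp yp al _hdom hpre
  obtain ⟨hnz, hle⟩ := hpre
  unfold Spec_compute_pos compute_pos compute_pos_alt
  simp only []
  have hne : ∀ r ∈ pySplit sizes num_rows, r ≠ [] := split_rows_ne_nil sizes num_rows hle
  set rows := pySplit sizes num_rows with hrows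
  have hwid : rows.map (fun row => (row.map Prod.fst).sum + xp * ((row.length : Int) - 1))
      = rows.map (rowW xp) := by
    simp [rowW]
  have hzip : rows.zip (rows.map (rowW xp)) = rows.map (fun r => (r, rowW xp r)) :=
    Eq.symm List.map_prod_left_eq_zip
  rw [hwid, foldA_spec, hzip]
  rw [maxD_eq]
  have htx : (if rows.isEmpty then (0:Int)
      else (PySem.List.max? (([] : List Int) ++ rows.map (rowW xp)) (fun x => x)).getD 0)
      = (PySem.List.max? (rows.map (rowW xp)) (fun x => x)).getD 0 := by
    cases rows <;> rfl
  rw [htx, foldB_spec]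
  simp only [List.nil_append, zero_add]
  rw [assemble xp yp _ al rows hne 0]
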